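-- pv_equiv track=rewrite | github.com/amazon-braket/amazon-braket-sdk-python | .venv/Lib/site-packages/braket/analog_hamiltonian_simulator/rydberg/rydberg_simulator_helpers.py | _get_detuning_dict
-- ===== SOURCE A (Python) =====
-- def _get_detuning_dict(
--     targets: tuple[int], configurations: list[str]
-- ) -> dict[tuple[int, int], float]:
--     """Return the dict contains the detuning operators for a set of target atoms.
--
--     Args:
--         targets (tuple[int]): The target atoms of the detuning operator
--         configurations (list[str]): The list of configurations that comply with the blockade
--             approximation.
--
--     Returns:
--         dict[tuple[int, int], float]: The dictionary for the detuning operator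
--     """
--
--     detuning = {}  # The detuning term in the basis of configurations, as a dictionary
--
--     for ind_1, config in enumerate(configurations):
--         value = sum([1 for ind_2, item in enumerate(config) if item == "r" and ind_2 in targets])
--         if value > 0:
--             detuning[(ind_1, ind_1)] = value
--
--     return detuning
-- ===== SOURCE B (Python) =====
-- def _get_detuning_dict(
--     targets: tuple[int], configurations: list[str]
-- ) -> dict[tuple[int, int], float]:
--     """Count 'r' characters at target positions per configuration: sort the distinct
--     non-negative target indices once, then per configuration scan only the targets
--     that are valid indices (early break), instead of testing every character's
--     index for membership in the target list."""
--     tsorted = sorted(set(t for t in targets if t >= 0))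
--     detuning = {}
--     for ind_1, config in enumerate(configurations):
--         n = len(config)
--         value = 0
--         for i in tsorted:
--             if i >= n:
--                 break
--             if config[i] == "r":
--                 value += 1
--         if value > 0:
--             detuning[(ind_1, ind_1)] = value
--     return detuning
-- ===== Notes on version B (the rewrite author's own statement) =====
-- stated objective: faster
-- what changed: Instead of scanning every character of every configuration and testing its index for membership in the target list, B sorts the distinct non-negative target indices once and per configuration scans only the targets that are valid indices, breaking early at len(config).
import Mathlib
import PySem

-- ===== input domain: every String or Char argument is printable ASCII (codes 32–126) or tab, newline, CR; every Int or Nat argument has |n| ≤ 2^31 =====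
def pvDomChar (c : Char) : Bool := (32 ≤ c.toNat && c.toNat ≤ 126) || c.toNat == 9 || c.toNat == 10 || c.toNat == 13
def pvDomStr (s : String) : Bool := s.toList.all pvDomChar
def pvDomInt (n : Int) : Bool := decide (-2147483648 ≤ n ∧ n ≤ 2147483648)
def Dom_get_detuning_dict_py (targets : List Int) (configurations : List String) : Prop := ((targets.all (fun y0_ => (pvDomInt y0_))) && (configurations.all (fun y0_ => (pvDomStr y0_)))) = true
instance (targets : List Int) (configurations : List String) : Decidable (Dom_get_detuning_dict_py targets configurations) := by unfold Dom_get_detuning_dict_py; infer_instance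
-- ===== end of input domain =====

-- B sorts the distinct non-negative target indices once and, per configuration, scans only the
-- targets that are valid indices (early break), instead of testing every character's index for
-- membership in the target list (objective: faster; measured).


-- ===== PORT A =====
-- value = sum([1 for ind_2, item in enumerate(config) if item == "r" and ind_2 in targets])
def pvAValue (targets : List Int) (config : String) : Int :=
  (((PySem.List.enumerate config.toList).filter
      (fun q => q.2 == 'r' && targets.contains q.1)).map (fun _ => (1 : Int))).sum

def get_detuning_dict_py (targets : List Int) (configurations : List String) : List (Int × Int × Int) :=
  ((PySem.List.enumerate configurations).foldl
    (fun (d : PySem.Dict (Int × Int) Int) p =>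
      let value := pvAValue targets p.2
      if value > 0 then d.insert (p.1, p.1) value else d)
    (PySem.Dict.empty)).items.map (fun e => (e.1.1, e.1.2, e.2))

-- ===== PORT B =====
-- for i in tsorted: if i >= n: break; if config[i] == "r": value += 1
def pvBCount (cs : List Char) : List Int → Int
  | [] => 0
  | i :: rest =>
    if (cs.length : Int) ≤ i then 0
    else (if PySem.List.pyGet? cs i == some 'r' then 1 else 0) + pvBCount cs rest

def get_detuning_dict_py_alt (targets : List Int) (configurations : List String) : List (Int × Int × Int) :=
  -- tsorted = sorted(set(t for t in targets if t >= 0))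
  let tsorted := PySem.List.sorted
    (PySem.Set.ofList (targets.filter (fun t => decide (0 ≤ t)))) (fun x => x) false
  ((PySem.List.enumerate configurations).foldl
    (fun (d : PySem.Dict (Int × Int) Int) p =>
      let value := pvBCount p.2.toList tsorted
      if value > 0 then d.insert (p.1, p.1) value else d)
    (PySem.Dict.empty)).items.map (fun e => (e.1.1, e.1.2, e.2))

-- ===== PRECONDITION & SPEC =====
def Spec_get_detuning_dict_py (targets : List Int) (configurations : List String) (out : List (Int × Int × Int)) : Prop := out = get_detuning_dict_py_alt targets configurations
instance (targets : List Int) (configurations : List String) (out : List (Int × Int × Int)) : Decidable (Spec_get_detuning_dict_py targets configurations out) := by unfold Spec_get_detuning_dict_py; infer_instance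

-- ===== CLAIM (what is proved, stated in full; the proofs are below) =====
def Claim_equal_get_detuning_dict_py : Prop := ∀ (targets : List Int) (configurations : List String), Dom_get_detuning_dict_py targets configurations → Spec_get_detuning_dict_py targets configurations (get_detuning_dict_py targets configurations)

-- ===== LEMMAS AND PROOFS =====

-- On a strictly increasing list the early break loses nothing: pvBCount is a plain countP.
theorem pvBCount_eq_countP (cs : List Char) (l : List Int) (hl : l.Pairwise (· < ·)) :
    pvBCount cs l
      = ((l.countP (fun i => decide (i < (cs.length : Int))
            && (PySem.List.pyGet? cs i == some 'r'))) : Int) := by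
  induction l with
  | nil => simp [pvBCount]
  | cons i rest ih =>
    rcases List.pairwise_cons.mp hl with ⟨hi, hrest⟩
    rw [pvBCount]
    split_ifs with hlen hr2
    · rw [List.countP_cons]
      have h0 : rest.countP (fun j => decide (j < (cs.length : Int))
          && (PySem.List.pyGet? cs j == some 'r')) = 0 := by
        rw [List.countP_eq_zero]
        intro j hj
        have := hi j hj
        simp only [Bool.and_eq_true, decide_eq_true_eq, not_and]
        intro hji
        omega
      have hhead : (decide (i < (cs.length : Int))
          && (PySem.List.pyGet? cs i == some 'r')) = false := by
        simp only [Bool.and_eq_false_iff, decide_eq_false_iff_not]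
        left; omega
      simp [h0, hhead]
    · rw [List.countP_cons, ih hrest]
      have hlt : decide (i < (cs.length : Int)) = true := by simp; omega
      simp [hlt, hr2]
      ring
    · rw [List.countP_cons, ih hrest]
      simp [hr2]

-- The per-configuration counts agree: both count the positions j of config that hold 'r' and lie in targets.
theorem pvValue_eq (targets : List Int) (config : String) :
    pvAValue targets config
      = pvBCount config.toList
          (PySem.List.sorted
            (PySem.Set.ofList (targets.filter (fun t => decide (0 ≤ t)))) (fun x => x) false) := by
  unfold pvAValue
  set cs := config.toList with hcs
  set P : Int × Char → Bool := fun q => q.2 == 'r' && targets.contains q.1 with hP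
  set Q : Int → Bool := fun i => decide (i < (cs.length : Int))
      && (PySem.List.pyGet? cs i == some 'r') with hQ
  rw [pvBCount_eq_countP cs _ (PySem.List.sorted_ofList_pairwise_lt _)]
  rw [(PySem.List.sorted_perm _ _ _).countP_eq]
  have hsum : ((((PySem.List.enumerate cs).filter P).map (fun _ => (1 : Int))).sum : Int)
      = ((((PySem.List.enumerate cs).filter P).length : Nat) : Int) := by
    generalize ((PySem.List.enumerate cs).filter P) = l
    induction l with
    | nil => simp
    | cons a t ih => simp; ring
  rw [hsum, List.countP_eq_length_filter]
  congr 1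
  have hperm : (((PySem.List.enumerate cs).filter P).map (·.1)).Perm
      ((PySem.Set.ofList (targets.filter (fun t => decide (0 ≤ t))) : List Int).filter Q) := by
    apply (List.perm_ext_iff_of_nodup ?_ ?_).mpr
    · -- membership
      intro a
      constructor
      · intro ha
        rcases List.mem_map.mp ha with ⟨q, hq, rfl⟩
        rcases List.mem_filter.mp hq with ⟨hqmem, hqP⟩
        rcases (PySem.List.mem_enumerate_iff cs 0 q).mp hqmem with ⟨k, hk, rfl⟩
        simp only [hP, Bool.and_eq_true, beq_iff_eq, List.contains_iff_mem] at hqP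
        apply List.mem_filter.mpr
        constructor
        · apply (PySem.Set.mem_ofList _ _).mpr
          exact List.mem_filter.mpr ⟨hqP.2, by simp⟩
        · simp only [hQ, Bool.and_eq_true, decide_eq_true_eq, beq_iff_eq]
          have h0 : (0 : Int) ≤ 0 + (k : Int) := by omega
          have h1 : 0 + (k : Int) < (cs.length : Int) := by omega
          refine ⟨h1, ?_⟩
          have : PySem.List.pyGet? cs (0 + (k : Int)) = some (cs[(0 + (k:Int)).toNat]'(by omega)) :=
            PySem.List.pyGet?_eq_some_getElem cs h0 h1
          rw [this]
          simp [hqP.1]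
      · intro ha
        rcases List.mem_filter.mp ha with ⟨hmem, hQa⟩
        rcases List.mem_filter.mp ((PySem.Set.mem_ofList _ _).mp hmem) with ⟨hat, ha0⟩
        simp only [decide_eq_true_eq] at ha0
        simp only [hQ, Bool.and_eq_true, decide_eq_true_eq, beq_iff_eq] at hQa
        obtain ⟨h1, hr⟩ := hQa
        have hget : PySem.List.pyGet? cs a = some (cs[a.toNat]'(by omega)) :=
          PySem.List.pyGet?_eq_some_getElem cs ha0 h1
        rw [hget] at hr
        injection hr with hr
        apply List.mem_map.mpr
        refine ⟨(0 + (a.toNat : Int), cs[a.toNat]'(by omega)), ?_, by omega⟩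
        apply List.mem_filter.mpr
        constructor
        · exact (PySem.List.mem_enumerate_iff cs 0 _).mpr ⟨a.toNat, by omega, rfl⟩
        · simp only [hP, Bool.and_eq_true, beq_iff_eq, List.contains_iff_mem]
          refine ⟨hr, ?_⟩
          have : (0 + (a.toNat : Int)) = a := by omega
          rw [this]
          exact hat
    · -- L1 nodup: enumerate indices are strictly increasing
      have hpw := PySem.List.pairwise_lt_enumerate cs 0
      have hpw2 := List.Pairwise.sublist (List.filter_sublist (p := P)) hpw
      have : (((PySem.List.enumerate cs).filter P).map (·.1)).Pairwise (· < ·) :=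
        (List.pairwise_map).mpr hpw2
      exact this.imp (fun h => ne_of_lt h)
    · exact (PySem.Set.nodup_ofList _).filter Q
  simpa [List.length_map] using hperm.length_eq

-- ===== VERDICT (by name: the statement is the Claim_ definition above) =====
theorem get_detuning_dict_py_spec : Claim_equal_get_detuning_dict_py := by
  intro targets configurations _
  show _ = _
  unfold get_detuning_dict_py get_detuning_dict_py_alt
  simp only [pvValue_eq]
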